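-- pv_equiv track=rewrite | github.com/ZilbauerLab/NLRC5_MHCI | feature_selection_binary_classifier_risk_score/WilliamXXu_utilities.py | pair_generator
-- ===== SOURCE A (Python) =====
-- def pair_generator(li,option):
--     #'no diagnoal', 'no rep', 'all'
--
--     res=[]
--     for x in range(len(li)):
--         if option=='all':
--             for y in li:
--                 res.append((li[x],y))
--         elif option =='no diagnoal':
--             for y in li:
--                 if li[x]!=y:
--                     res.append((li[x],y))
--         elif option =='no rep':
--             for y in range(x+1,len(li)):
--                 res.append((li[x],li[y]))
--     return res
-- ===== SOURCE B (Python) =====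
-- def _suffix_pairs(li):
--     # structural recursion on suffixes: pair the head with each later element,
--     # then recurse on the tail -- no indices, no range/len
--     if not li:
--         return []
--     h, t = li[0], li[1:]
--     return [(h, y) for y in t] + _suffix_pairs(t)
--
-- def pair_generator(li, option):
--     # dispatch once on the mode, then work on VALUES only: comprehensions over
--     # the elements themselves for 'all'/'no diagnoal', and head/tail suffix
--     # recursion for 'no rep' -- A's index loops (range(len(li)), li[x]) disappear
--     if option == 'all':
--         return [(x, y) for x in li for y in li]
--     if option == 'no diagnoal':
--         return [(x, y) for x in li for y in li if x != y]
--     if option == 'no rep':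
--         return _suffix_pairs(li)
--     return []
-- ===== Notes on version B (the rewrite author's own statement) =====
-- stated objective: simpler
-- what changed: B drops A's index machinery entirely: it dispatches on the mode once and then works on values only - plain comprehensions over the elements themselves for 'all' and 'no diagnoal', and a head/tail structural recursion over suffixes for 'no rep' (pair the head with every later element, recurse on the tail), so range(len(li)), li[x] and the x+1..n index range all disappear.
import Mathlib
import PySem

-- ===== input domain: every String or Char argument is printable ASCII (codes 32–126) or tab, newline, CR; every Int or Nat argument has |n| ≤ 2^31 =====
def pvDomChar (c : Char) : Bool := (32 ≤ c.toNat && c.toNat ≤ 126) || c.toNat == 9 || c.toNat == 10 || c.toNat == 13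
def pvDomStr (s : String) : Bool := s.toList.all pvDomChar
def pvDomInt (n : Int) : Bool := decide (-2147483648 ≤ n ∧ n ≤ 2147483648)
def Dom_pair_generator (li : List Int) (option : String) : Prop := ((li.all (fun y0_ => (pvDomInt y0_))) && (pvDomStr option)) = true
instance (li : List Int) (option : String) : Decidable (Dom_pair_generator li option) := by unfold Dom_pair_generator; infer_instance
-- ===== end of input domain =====

-- B dispatches on the mode once and works on values only: comprehensions over the
-- elements for 'all'/'no diagnoal' and head/tail suffix recursion for 'no rep',
-- removing A's index loops entirely (objective: simpler; same O(n^2) cost).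

-- ===== PORT A =====
def pair_generator (li : List Int) (option : String) : List (Int × Int) :=
  (PySem.List.pyRange 0 (li.length : Int) 1).foldl (fun res x =>
    if option == "all" then
      li.foldl (fun r y => r ++ [(PySem.List.pyGetD li x 0, y)]) res
    else if option == "no diagnoal" then
      li.foldl (fun r y =>
        if PySem.List.pyGetD li x 0 ≠ y then r ++ [(PySem.List.pyGetD li x 0, y)] else r) res
    else if option == "no rep" then
      (PySem.List.pyRange (x + 1) (li.length : Int) 1).foldl (fun r y =>
        r ++ [(PySem.List.pyGetD li x 0, PySem.List.pyGetD li y 0)]) res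
    else res) []

-- ===== PORT B =====
-- structural recursion on suffixes (Source B's _suffix_pairs)
def pvSuffixPairs : List Int → List (Int × Int)
  | [] => []
  | h :: t => t.map (fun y => (h, y)) ++ pvSuffixPairs t

def pair_generator_alt (li : List Int) (option : String) : List (Int × Int) :=
  if option == "all" then li.flatMap (fun x => li.map (fun y => (x, y)))
  else if option == "no diagnoal" then
    li.flatMap (fun x => (li.filter (fun y => x != y)).map (fun y => (x, y)))
  else if option == "no rep" then pvSuffixPairs li
  else []

-- ===== PRECONDITION & SPEC =====
def Spec_pair_generator (li : List Int) (option : String) (out : List (Int × Int)) : Prop := out = pair_generator_alt li option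
instance (li : List Int) (option : String) (out : List (Int × Int)) : Decidable (Spec_pair_generator li option out) := by unfold Spec_pair_generator; infer_instance

-- ===== CLAIM (what is proved, stated in full; the proofs are below) =====
def Claim_equal_pair_generator : Prop := ∀ (li : List Int) (option : String), Dom_pair_generator li option → Spec_pair_generator li option (pair_generator li option)

-- ===== LEMMAS AND PROOFS =====

theorem pv_flatMap_congr {α β : Type} (l : List α) (f g : α → List β)
    (h : ∀ a ∈ l, f a = g a) : l.flatMap f = l.flatMap g := by
  induction l with
  | nil => rfl
  | cons a l ih =>
    simp only [List.flatMap_cons, h a (List.mem_cons_self), ih (fun b hb => h b (List.mem_cons_of_mem a hb))]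

-- flatMap over range(len li) with the body depending only on li[i] is flatMap over li
theorem pv_flatMap_pyRange_pyGetD (li : List Int) (g : Int → List (Int × Int)) :
    (PySem.List.pyRange 0 (li.length : Int) 1).flatMap (fun i => g (PySem.List.pyGetD li i 0))
      = li.flatMap g := by
  have h : (PySem.List.pyRange 0 (li.length : Int) 1).flatMap (fun i => g (PySem.List.pyGetD li i 0))
      = ((PySem.List.pyRange 0 (li.length : Int) 1).map (fun i => PySem.List.pyGetD li i 0)).flatMap g := by
    rw [List.flatMap_map]
  rw [h, PySem.List.map_pyGetD_pyRange_zero']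

-- A's 'no rep' triangle of index ranges is B's suffix recursion
theorem pv_norep_eq (li : List Int) :
    (List.range li.length).flatMap
      (fun k => (li.drop (k + 1)).map (fun y => (li.getD k 0, y)))
      = pvSuffixPairs li := by
  induction li with
  | nil => rfl
  | cons h t ih =>
    rw [show (h :: t).length = t.length + 1 from rfl, List.range_succ_eq_map,
        List.flatMap_cons, List.flatMap_map]
    simp only [List.drop_succ_cons, List.getD_cons_succ, List.drop_zero, List.getD_cons_zero]
    rw [show (fun k => (t.drop (k + 1)).map (fun y => ((t.getD k 0, y) : Int × Int)))
          = (fun x => List.map (fun y => (List.getD t x 0, y)) (List.drop (x + 1) t)) from rfl] at ih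
    unfold pvSuffixPairs
    rw [ih]

theorem pair_generator_eq (li : List Int) (option : String) :
    pair_generator li option = pair_generator_alt li option := by
  unfold pair_generator pair_generator_alt
  by_cases hall : option == "all"
  · simp only [hall, if_pos]
    simp only [PySem.List.foldl_append_singleton_eq_map]
    rw [PySem.List.foldl_append_eq_flatMap
      (g := fun x => li.map (fun y => (PySem.List.pyGetD li x 0, y))), List.nil_append]
    exact pv_flatMap_pyRange_pyGetD li (fun v => li.map (fun y => (v, y)))
  · simp only [hall, if_neg, Bool.false_eq_true, not_false_iff]
    by_cases hnd : option == "no diagnoal"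
    · simp only [hnd, if_pos]
      simp only [PySem.List.foldl_append_ite
        (p := fun y => PySem.List.pyGetD li _ 0 ≠ y)]
      rw [PySem.List.foldl_append_eq_flatMap
        (g := fun x => ((li.filter (fun y => decide (PySem.List.pyGetD li x 0 ≠ y))).map
          (fun y => (PySem.List.pyGetD li x 0, y)))), List.nil_append]
      have := pv_flatMap_pyRange_pyGetD li
        (fun v => (li.filter (fun y => decide (v ≠ y))).map (fun y => (v, y)))
      rw [this]
      apply pv_flatMap_congr
      intro x _
      congr 1
      apply List.filter_congr
      intro y _
      simp [bne]
      rfl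
    · simp only [hnd, if_neg, Bool.false_eq_true, not_false_iff]
      by_cases hnr : option == "no rep"
      · simp only [hnr, if_pos]
        simp only [PySem.List.foldl_append_singleton_eq_map]
        rw [PySem.List.foldl_append_eq_flatMap
          (g := fun x => (PySem.List.pyRange (x + 1) (li.length : Int) 1).map
            (fun y => (PySem.List.pyGetD li x 0, PySem.List.pyGetD li y 0))), List.nil_append]
        -- convert the outer range to a Nat range and the inner range to a drop
        rw [PySem.List.pyRange_one 0 (li.length : Int)]
        simp only [Int.sub_zero, Int.toNat_natCast, List.flatMap_map]
        rw [← pv_norep_eq li]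
        apply pv_flatMap_congr
        intro k _
        have h1 : ((0 : Int) + (k : Int) + 1) = (((k + 1 : Nat)) : Int) := by push_cast; ring
        have h2 : ((0 : Int) + (k : Int)) = ((k : Nat) : Int) := by omega
        rw [h1, h2, PySem.List.pyGetD_natCast]
        have h3 : (PySem.List.pyRange (((k + 1 : Nat)) : Int) (li.length : Int) 1).map
            (fun j => PySem.List.pyGetD li j 0) = li.drop (k + 1) := by
          simpa using PySem.List.map_pyGetD_pyRange' li 0 (a := (((k + 1 : Nat)) : Int)) (by positivity)
        rw [← h3, List.map_map]
        rfl
      · simp only [hnr, if_neg, Bool.false_eq_true, not_false_iff]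
        rw [List.foldl_fixed]

-- ===== VERDICT (by name: the statement is the Claim_ definition above) =====
theorem pair_generator_spec : Claim_equal_pair_generator := by
  intro li option _
  unfold Spec_pair_generator
  exact pair_generator_eq li option
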